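-- pv_equiv track=rewrite | github.com/SoftwareLogico/omni-cli | sot_cli/sot.py | _parse_tracked_files_from_text
-- ===== SOURCE A (Python) =====
-- def _parse_tracked_files_from_text(sot_text: str) -> dict[str, str]:
--     tracked_files: dict[str, str] = {}
--     lines = sot_text.split("\n")
--     index = 0
--
--     while index < len(lines):
--         line = lines[index]
--         if not line.startswith("--- FILE: ") or not line.endswith(" ---"):
--             index += 1
--             continue
--
--         header = line[len("--- FILE: "):-len(" ---")]
--         path = header.rsplit(" (", 1)[0]
--         end_marker = f"--- END: {path} ---"
--
--         index += 1
--         body: list[str] = []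
--         while index < len(lines) and lines[index] != end_marker:
--             body.append(lines[index])
--             index += 1
--
--         tracked_files[path] = "\n".join(body)
--         if index < len(lines):
--             index += 1
--
--     return tracked_files
-- ===== SOURCE B (Python) =====
-- def _parse_tracked_files_from_text(sot_text: str) -> dict[str, str]:
--     lines = sot_text.split("\n")
--     headers = [(i, line) for i, line in enumerate(lines)
--                if line.startswith("--- FILE: ") and line.endswith(" ---")]
--     tracked_files: dict[str, str] = {}
--     cursor = 0
--     for i, line in headers:
--         if i < cursor:
--             continue
--         path = line[len("--- FILE: "):-len(" ---")].rsplit(" (", 1)[0]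
--         tail = lines[i + 1:]
--         try:
--             k = tail.index(f"--- END: {path} ---")
--             body, cursor = tail[:k], i + 2 + k
--         except ValueError:
--             body, cursor = tail, len(lines)
--         tracked_files[path] = "\n".join(body)
--     return tracked_files
-- ===== Notes on version B (the rewrite author's own statement) =====
-- stated objective: alternative
-- what changed: Replaces A's cursor-driven state machine (outer while with an inner body-collecting while) by a staged parse: first collect all header positions with enumerate, then for each header not swallowed by a previous body locate its end marker with list.index and slice the body out of the line list.
import Mathlib
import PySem

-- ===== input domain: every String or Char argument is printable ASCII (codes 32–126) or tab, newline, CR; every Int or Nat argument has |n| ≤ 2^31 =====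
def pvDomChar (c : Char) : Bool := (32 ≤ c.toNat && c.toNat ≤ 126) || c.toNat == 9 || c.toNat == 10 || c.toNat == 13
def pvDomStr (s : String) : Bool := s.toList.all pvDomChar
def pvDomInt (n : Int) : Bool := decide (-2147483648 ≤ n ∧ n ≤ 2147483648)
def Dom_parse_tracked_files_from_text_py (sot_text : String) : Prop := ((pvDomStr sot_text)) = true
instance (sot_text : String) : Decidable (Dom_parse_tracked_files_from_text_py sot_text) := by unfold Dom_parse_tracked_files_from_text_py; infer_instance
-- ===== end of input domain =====

-- B is staged: first enumerate all header lines with their positions, then for each header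
-- (skipping those swallowed by a previous body) locate its end marker with list.index and
-- slice the body out of the line list — no per-line state machine; objective: alternative
-- decomposition, same cost.

-- helpers shared by both ports: the identical Python expressions
-- 'header.rsplit(" (", 1)[0]' and f"--- END: {path} ---"
def pvRsplitOpen (header : String) : String :=
  let i := PySem.Str.rfind header " ("
  if i == -1 then header else PySem.Str.slice header none (some i)

def pvEndMarker (path : String) : String := "--- END: " ++ path ++ " ---"

-- ===== PORT A =====
-- A's inner 'while index < len(lines) and lines[index] != end_marker' plus the
-- 'if index < len(lines): index += 1' skip of the marker: returns (body, remaining lines)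
def aTakeBody (em : String) : List String → (List String × List String)
  | [] => ([], [])
  | l :: ls =>
    if l == em then ([], ls)
    else
      let (b, r) := aTakeBody em ls
      (l :: b, r)

-- termination measure for aLoop (the port cites it in decreasing_by)
theorem aTakeBody_len (em : String) (ls : List String) :
    (aTakeBody em ls).2.length ≤ ls.length := by
  induction ls with
  | nil => simp [aTakeBody]
  | cons l ls ih =>
    simp only [aTakeBody]
    split
    · simp
    · simpa using Nat.le_succ_of_le ih

-- A's outer while over the line cursor
def aLoop (d : PySem.Dict String String) : List String → PySem.Dict String String
  | [] => d
  | line :: rest =>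
    if !PySem.Str.startswith line "--- FILE: " || !PySem.Str.endswith line " ---" then
      aLoop d rest
    else
      let header := PySem.Str.slice line (some 10) (some (-4))
      let path := pvRsplitOpen header
      let em := pvEndMarker path
      let body := (aTakeBody em rest).1
      let rest' := (aTakeBody em rest).2
      aLoop (d.insert path (PySem.Str.join "\n" body)) rest'
termination_by ls => ls.length
decreasing_by
  · simp
  · exact Nat.lt_succ_of_le (aTakeBody_len _ _)

def parse_tracked_files_from_text_py (sot_text : String) : List (String × String) :=
  (aLoop PySem.Dict.empty ((PySem.Str.split? sot_text "\n").getD [])).items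

-- ===== PORT B =====
-- stage 1: the header comprehension '[(i, line) for i, line in enumerate(lines) if …]'
def bHeaders (lines : List String) : List (Int × String) :=
  (PySem.List.enumerate lines 0).filter (fun p =>
    PySem.Str.startswith p.2 "--- FILE: " && PySem.Str.endswith p.2 " ---")

-- the try/except block: 'body, cursor = tail[:k], i + 2 + k' or 'tail, len(lines)'
def bBody (lines : List String) (i : Int) (path : String) : List String × Int :=
  match PySem.List.index? (PySem.List.slice lines (some (i + 1)) none) (pvEndMarker path) with
  | some k =>
      (PySem.List.slice (PySem.List.slice lines (some (i + 1)) none) none (some (k : Int)),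
       i + 2 + (k : Int))
  | none => (PySem.List.slice lines (some (i + 1)) none, (lines.length : Int))

-- stage 2: the for-loop over the collected headers with the skip cursor
def bGo (lines : List String) : List (Int × String) → PySem.Dict String String → Int → PySem.Dict String String
  | [], d, _ => d
  | (i, line) :: hs, d, cursor =>
    if i < cursor then bGo lines hs d cursor
    else
      bGo lines hs
        (d.insert (pvRsplitOpen (PySem.Str.slice line (some 10) (some (-4))))
          (PySem.Str.join "\n" (bBody lines i (pvRsplitOpen (PySem.Str.slice line (some 10) (some (-4))))).1))
        (bBody lines i (pvRsplitOpen (PySem.Str.slice line (some 10) (some (-4))))).2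

def parse_tracked_files_from_text_py_alt (sot_text : String) : List (String × String) :=
  let lines := (PySem.Str.split? sot_text "\n").getD []
  (bGo lines (bHeaders lines) PySem.Dict.empty 0).items

-- ===== PRECONDITION & SPEC =====
def Spec_parse_tracked_files_from_text_py (sot_text : String) (out : List (String × String)) : Prop := out = parse_tracked_files_from_text_py_alt sot_text
instance (sot_text : String) (out : List (String × String)) : Decidable (Spec_parse_tracked_files_from_text_py sot_text out) := by unfold Spec_parse_tracked_files_from_text_py; infer_instance

-- ===== CLAIM =====
def Claim_equal_parse_tracked_files_from_text_py : Prop := ∀ (sot_text : String), Dom_parse_tracked_files_from_text_py sot_text → Spec_parse_tracked_files_from_text_py sot_text (parse_tracked_files_from_text_py sot_text)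

-- ===== LEMMAS AND PROOFS =====

def pvIsHeader (l : String) : Bool :=
  PySem.Str.startswith l "--- FILE: " && PySem.Str.endswith l " ---"

-- membership characterisation of stage 1
theorem mem_bHeaders {lines : List String} {i : Int} {l : String} :
    (i, l) ∈ bHeaders lines ↔
      ∃ k : Nat, ∃ h : k < lines.length, i = (k : Int) ∧ l = lines[k] ∧ pvIsHeader l = true := by
  unfold bHeaders pvIsHeader
  rw [List.mem_filter, PySem.List.mem_enumerate_iff]
  constructor
  · rintro ⟨⟨k, hk, hp⟩, hc⟩
    obtain ⟨hi, hl⟩ := Prod.mk.injEq .. ▸ hp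
    exact ⟨k, hk, by omega, by simp_all, by simp_all⟩
  · rintro ⟨k, hk, hi, hl, hc⟩
    exact ⟨⟨k, hk, by simp [hi, hl]⟩, by simp_all⟩

theorem pairwise_bHeaders (lines : List String) :
    (bHeaders lines).Pairwise (fun p q => p.1 < q.1) :=
  (PySem.List.pairwise_lt_enumerate lines 0).filter _

-- A's body collection, phrased through B's index? search (marker found)
theorem aTakeBody_of_index?_some {em : String} {ls : List String} {k : Nat}
    (h : PySem.List.index? ls em = some k) :
    aTakeBody em ls = (ls.take k, ls.drop (k + 1)) := by
  induction ls generalizing k with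
  | nil => simp [PySem.List.index?_eq_idxOf?] at h
  | cons l ls ih =>
    by_cases he : l = em
    · subst he
      rw [PySem.List.index?_cons_self] at h
      cases h
      simp [aTakeBody]
    · rw [PySem.List.index?_cons_of_ne ls he] at h
      cases hk : PySem.List.index? ls em with
      | none => rw [hk] at h; simp at h
      | some k' =>
        rw [hk] at h
        simp only [Option.map_some] at h
        cases h
        simp [aTakeBody, he, ih hk]

-- (marker absent)
theorem aTakeBody_of_index?_none {em : String} {ls : List String}
    (h : PySem.List.index? ls em = none) :
    aTakeBody em ls = (ls, []) := by
  induction ls with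
  | nil => simp [aTakeBody]
  | cons l ls ih =>
    rw [PySem.List.index?_eq_none_iff] at h
    simp only [List.mem_cons, not_or] at h
    have := ih ((PySem.List.index?_eq_none_iff ls em).mpr h.2)
    simp [aTakeBody, Ne.symm h.1, this]

-- aLoop step lemmas (unfold A's outer while one iteration)
theorem aLoop_cons_nonheader {line : String} (h : pvIsHeader line = false)
    (d : PySem.Dict String String) (rest : List String) :
    aLoop d (line :: rest) = aLoop d rest := by
  rw [aLoop, if_pos (by unfold pvIsHeader at h; rw [← Bool.not_and, h]; rfl)]

theorem aLoop_cons_header {line : String} (h : pvIsHeader line = true)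
    (d : PySem.Dict String String) (rest : List String) :
    aLoop d (line :: rest) =
      aLoop (d.insert (pvRsplitOpen (PySem.Str.slice line (some 10) (some (-4))))
          (PySem.Str.join "\n"
            (aTakeBody (pvEndMarker (pvRsplitOpen (PySem.Str.slice line (some 10) (some (-4))))) rest).1))
        (aTakeBody (pvEndMarker (pvRsplitOpen (PySem.Str.slice line (some 10) (some (-4))))) rest).2 := by
  rw [aLoop, if_neg (by unfold pvIsHeader at h; rw [← Bool.not_and, h]; simp)]

-- aLoop does nothing on a header-free run of lines
theorem aLoop_no_header {ls : List String} (h : ∀ l ∈ ls, pvIsHeader l = false)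
    (d : PySem.Dict String String) : aLoop d ls = d := by
  induction ls with
  | nil => rw [aLoop]
  | cons l ls ih =>
    rw [aLoop_cons_nonheader (h l (by simp)) d ls]
    exact ih (fun x hx => h x (by simp [hx]))

-- bGo does nothing once the cursor is past every remaining header
theorem bGo_skip_all {lines : List String} {hs : List (Int × String)} {c : Int}
    (h : ∀ p ∈ hs, p.1 < c) (d : PySem.Dict String String) :
    bGo lines hs d c = d := by
  induction hs with
  | nil => rfl
  | cons p hs ih =>
    obtain ⟨i, l⟩ := p
    rw [bGo, if_pos (h (i, l) (by simp))]
    exact ih (fun q hq => h q (by simp [hq]))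

-- the two outcomes of the try/except helper
theorem bBody_of_some {lines : List String} {c k : Nat} {path : String}
    (h : PySem.List.index? (lines.drop (c + 1)) (pvEndMarker path) = some k) :
    bBody lines (c : Int) path = ((lines.drop (c + 1)).take k, ((c + 2 + k : Nat) : Int)) := by
  have ht : PySem.List.slice lines (some ((c : Int) + 1)) none = lines.drop (c + 1) := by
    rw [show ((c : Int) + 1) = ((c + 1 : Nat) : Int) by push_cast; ring,
      PySem.List.slice_from_natCast]
  simp only [bBody, ht, h, PySem.List.slice_to_natCast]
  rw [show ((c : Int) + 2 + (k : Int)) = ((c + 2 + k : Nat) : Int) by push_cast; ring]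

theorem bBody_of_none {lines : List String} {c : Nat} {path : String}
    (h : PySem.List.index? (lines.drop (c + 1)) (pvEndMarker path) = none) :
    bBody lines (c : Int) path = (lines.drop (c + 1), (lines.length : Int)) := by
  have ht : PySem.List.slice lines (some ((c : Int) + 1)) none = lines.drop (c + 1) := by
    rw [show ((c : Int) + 1) = ((c + 1 : Nat) : Int) by push_cast; ring,
      PySem.List.slice_from_natCast]
  simp only [bBody, ht, h]

-- the main simulation: bGo over the remaining headers = aLoop over the remaining lines
theorem bGo_eq_aLoop (lines : List String) : ∀ (n : ℕ) (hs : List (Int × String)) (c : Nat)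
    (d : PySem.Dict String String),
    hs.length + (lines.length - c) ≤ n →
    (∃ pre, bHeaders lines = pre ++ hs ∧ ∀ p ∈ pre, p.1 < (c : Int)) →
    bGo lines hs d (c : Int) = aLoop d (lines.drop c) := by
  intro n
  induction n with
  | zero =>
    intro hs c d hn hinv
    have h1 : hs = [] := List.eq_nil_of_length_eq_zero (by omega)
    have h2 : lines.length ≤ c := by omega
    subst h1
    rw [List.drop_eq_nil_of_le h2, aLoop]
    rfl
  | succ n ih =>
    intro hs c d hn hinv
    obtain ⟨pre, hpre, hprelt⟩ := hinv
    match hs with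
    | [] =>
      refine Eq.trans rfl (aLoop_no_header ?_ d).symm
      intro l hl
      by_contra hcontra
      obtain ⟨j, hj, hlj⟩ := List.mem_iff_getElem.mp hl
      have hjlen : c + j < lines.length := by
        have := hj; simp [List.length_drop] at this; omega
      have hlv : l = lines[c + j] := by
        rw [← hlj]; simp [List.getElem_drop]
      have hmem : (((c + j : Nat) : Int), l) ∈ bHeaders lines :=
        mem_bHeaders.mpr ⟨c + j, hjlen, rfl, hlv, by simpa using hcontra⟩
      rw [hpre, List.append_nil] at hmem
      have := hprelt _ hmem
      simp only at this
      exact absurd this (by push_cast; omega)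
    | (i, line) :: hs' =>
      by_cases hskip : i < (c : Int)
      · rw [bGo, if_pos hskip]
        refine ih hs' c d (by simp at hn ⊢; omega) ⟨pre ++ [(i, line)], by simp [hpre], ?_⟩
        intro p hp
        rcases List.mem_append.mp hp with h | h
        · exact hprelt p h
        · have hpe : p = (i, line) := by simpa using h
          rw [hpe]; exact hskip
      · -- the head header is not skipped: it must sit exactly at position c? not necessarily:
        -- positions c, c+1, … up to the head's index carry no header, so aLoop walks past them.
        have hmemhd : (i, line) ∈ bHeaders lines := by
          rw [hpre]; exact List.mem_append_right pre (by simp)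
        obtain ⟨k0, hk0len, hik, hlk, hhd⟩ := mem_bHeaders.mp hmemhd
        have hck0 : c ≤ k0 := by omega
        have hclen : c < lines.length := by omega
        by_cases hhc : pvIsHeader (lines[c]'hclen) = true
        · -- a header at position c: it must be the head of hs
          have hmemc : ((c : Int), lines[c]'hclen) ∈ bHeaders lines :=
            mem_bHeaders.mpr ⟨c, hclen, rfl, rfl, hhc⟩
          rw [hpre, List.mem_append] at hmemc
          have hc_in_hs : ((c : Int), lines[c]'hclen) ∈ (i, line) :: hs' := by
            rcases hmemc with h | h
            · exact absurd (hprelt _ h) (by simp)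
            · exact h
          have hpw : ((i, line) :: hs').Pairwise (fun p q => p.1 < q.1) := by
            have := pairwise_bHeaders lines
            rw [hpre] at this
            exact (List.pairwise_append.mp this).2.1
          have hhead : i = (c : Int) ∧ line = lines[c]'hclen := by
            rcases List.mem_cons.mp hc_in_hs with h | h
            · obtain ⟨h1, h2⟩ := Prod.mk.inj h
              exact ⟨h1.symm, h2.symm⟩
            · exact absurd ((List.pairwise_cons.mp hpw).1 _ h) hskip
          rw [bGo, if_neg hskip, hhead.1, hhead.2]
          rw [List.drop_eq_getElem_cons hclen,
            aLoop_cons_header hhc d (lines.drop (c + 1))]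
          cases hidx : PySem.List.index? (lines.drop (c + 1))
              (pvEndMarker (pvRsplitOpen (PySem.Str.slice (lines[c]'hclen) (some 10) (some (-4))))) with
          | some k =>
            rw [bBody_of_some hidx, aTakeBody_of_index?_some hidx]
            have hdd : (lines.drop (c + 1)).drop (k + 1) = lines.drop (c + 2 + k) := by
              rw [List.drop_drop]; congr 1; omega
            rw [hdd]
            exact ih hs' (c + 2 + k) _ (by simp at hn ⊢; omega)
              ⟨pre ++ [((c : Int), lines[c]'hclen)], by rw [hpre, hhead.1, hhead.2]; simp, by
                intro p hp
                rcases List.mem_append.mp hp with h | h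
                · exact lt_of_lt_of_le (hprelt p h) (by push_cast; omega)
                · have hpe : p = ((c : Int), lines[c]'hclen) := by simpa using h
                  rw [hpe]; push_cast; omega⟩
          | none =>
            rw [bBody_of_none hidx, aTakeBody_of_index?_none hidx]
            rw [aLoop]
            refine bGo_skip_all ?_ _
            intro p hp
            have hpmem : p ∈ bHeaders lines := by
              rw [hpre]
              exact List.mem_append_right pre (by simp [hp])
            obtain ⟨i', l'⟩ := p
            obtain ⟨k', hk', hi', _, _⟩ := mem_bHeaders.mp hpmem
            simp only [hi']
            exact_mod_cast hk'
        · -- no header at position c: aLoop steps over it, bGo is unchanged by raising the view to c+1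
          have hne : i ≠ (c : Int) := by
            intro h
            have hkc : k0 = c := by omega
            have hx : pvIsHeader (lines[k0]'hk0len) = true := hlk ▸ hhd
            subst hkc
            exact hhc hx
          rw [List.drop_eq_getElem_cons hclen,
            aLoop_cons_nonheader (Bool.not_eq_true _ ▸ hhc) d (lines.drop (c + 1))]
          rw [show ((c : Nat) : Int) = ((c + 1 : Nat) : Int) - 1 by push_cast; ring]
          -- replace cursor c by c+1: every remaining header index is ≥ c+1
          have hstep : bGo lines ((i, line) :: hs') d (c : Int)
              = bGo lines ((i, line) :: hs') d ((c + 1 : Nat) : Int) := by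
            rw [bGo, if_neg hskip, bGo, if_neg (by push_cast; omega)]
          rw [show (((c + 1 : Nat) : Int) - 1) = ((c : Nat) : Int) by push_cast; ring, hstep]
          exact ih ((i, line) :: hs') (c + 1) d (by simp at hn ⊢; omega)
            ⟨pre, hpre, fun p hp => lt_trans (hprelt p hp) (by push_cast; omega)⟩

-- ===== VERDICT =====
theorem parse_tracked_files_from_text_py_spec : Claim_equal_parse_tracked_files_from_text_py := by
  intro sot_text _
  unfold Spec_parse_tracked_files_from_text_py
  unfold parse_tracked_files_from_text_py parse_tracked_files_from_text_py_alt
  set lines := (PySem.Str.split? sot_text "\n").getD [] with hl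
  show (aLoop PySem.Dict.empty lines).items = (bGo lines (bHeaders lines) PySem.Dict.empty 0).items
  have := bGo_eq_aLoop lines (lines.length + (bHeaders lines).length) (bHeaders lines) 0
    PySem.Dict.empty (by omega) ⟨[], by simp⟩
  simp only [Nat.cast_zero, List.drop_zero] at this
  rw [this]
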